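-- pv_equiv track=rewrite | github.com/deehzee/algods | practice/coderust/t0_arrays/p05_low_high_index.py | find_low_index1
-- ===== SOURCE A (Python) =====
-- def find_low_index1(arr, key):
--     """Find the low index of the key in the array arr.
--
--     Time:  O(log n)
--     Space: O(1)
--     """
--     lo, hi = 0, len(arr)
--     while lo < hi:
--         mi = (lo + hi) // 2
--         if arr[mi] < key:
--             lo = mi + 1
--         elif arr[mi] >= key:
--             hi = mi
--     if hi < len(arr) and arr[hi] == key:
--         return hi
--     return -1
-- ===== SOURCE B (Python) =====
-- def find_low_index1(arr, key):
--     """Find the low index of the key in the array arr.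
--
--     Size-based recursive binary search: recurse on the length of the
--     remaining window (lo, size) instead of iterating on (lo, hi).
--     """
--     def search(lo, size):
--         if size == 0:
--             return lo
--         half = size // 2
--         if key <= arr[lo + half]:
--             return search(lo, half)
--         return search(lo + half + 1, size - half - 1)
--
--     pos = search(0, len(arr))
--     if pos == len(arr) or arr[pos] != key:
--         return -1
--     return pos
-- ===== Notes on version B (the rewrite author's own statement) =====
-- stated objective: alternative
-- what changed: The iterative (lo,hi) while-loop is replaced by a size-based recursive binary search over a window (lo, size) with the comparison written as key <= arr[lo+half] (branches swapped) and a negated final guard.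
import Mathlib
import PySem

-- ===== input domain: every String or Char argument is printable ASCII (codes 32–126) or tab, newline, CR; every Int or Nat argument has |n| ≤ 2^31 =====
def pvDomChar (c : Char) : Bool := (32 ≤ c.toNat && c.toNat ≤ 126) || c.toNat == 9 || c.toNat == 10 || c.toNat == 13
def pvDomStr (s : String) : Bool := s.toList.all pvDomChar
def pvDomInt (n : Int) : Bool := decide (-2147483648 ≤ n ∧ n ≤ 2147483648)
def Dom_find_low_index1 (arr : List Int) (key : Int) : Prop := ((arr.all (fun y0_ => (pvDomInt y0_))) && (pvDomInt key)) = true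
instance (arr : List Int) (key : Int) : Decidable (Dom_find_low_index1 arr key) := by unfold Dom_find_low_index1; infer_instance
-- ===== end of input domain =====

-- B re-decomposes A's iterative binary search as a size-based recursion on the window length; same cost, same values.


-- ===== PORT A =====
-- A's while loop over (lo, hi); indices are always in range (0 ≤ lo ≤ mi < hi ≤ len),
-- so List.getD is exact there.  The 'elif arr[mi] >= key' condition is exactly the
-- negation of the 'if' condition, hence ported as the else branch.  The fuel only
-- makes the loop structurally total: hi - lo shrinks every iteration, so
-- fuel = len suffices and the fuel-exhausted case is never reached.
def find_low_index1_loopA (arr : List Int) (key : Int) : Nat → Nat → Nat → Nat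
  | 0, _, hi => hi
  | fuel + 1, lo, hi =>
    if lo < hi then
      let mi := (lo + hi) / 2
      if arr.getD mi 0 < key then find_low_index1_loopA arr key fuel (mi + 1) hi
      else find_low_index1_loopA arr key fuel lo mi
    else hi

def find_low_index1 (arr : List Int) (key : Int) : Int :=
  let hi := find_low_index1_loopA arr key arr.length 0 arr.length
  if hi < arr.length ∧ arr.getD hi 0 = key then (hi : Int) else -1

-- ===== PORT B =====
-- Source B's search(lo, size): recursion on the window length 'size'; fuel = len + 1
-- only makes it structural (size strictly shrinks, so the 0-fuel case is unreachable).
def find_low_index1_searchB (arr : List Int) (key : Int) : Nat → Nat → Nat → Nat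
  | 0, lo, _ => lo
  | fuel + 1, lo, size =>
    if size = 0 then lo
    else
      let half := size / 2
      if key ≤ arr.getD (lo + half) 0 then find_low_index1_searchB arr key fuel lo half
      else find_low_index1_searchB arr key fuel (lo + half + 1) (size - half - 1)

def find_low_index1_alt (arr : List Int) (key : Int) : Int :=
  let pos := find_low_index1_searchB arr key (arr.length + 1) 0 arr.length
  if pos = arr.length ∨ ¬ arr.getD pos 0 = key then -1 else (pos : Int)

-- ===== PRECONDITION & SPEC =====
def Spec_find_low_index1 (arr : List Int) (key : Int) (out : Int) : Prop := out = find_low_index1_alt arr key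
instance (arr : List Int) (key : Int) (out : Int) : Decidable (Spec_find_low_index1 arr key out) := by unfold Spec_find_low_index1; infer_instance

-- ===== CLAIM (what is proved, stated in full; the proofs are below) =====
def Claim_equal_find_low_index1 : Prop := ∀ (arr : List Int) (key : Int), Dom_find_low_index1 arr key → Spec_find_low_index1 arr key (find_low_index1 arr key)

-- ===== LEMMAS AND PROOFS =====

theorem searchB_le (arr : List Int) (key : Int) :
    ∀ (fuel lo size : Nat), find_low_index1_searchB arr key fuel lo size ≤ lo + size := by
  intro fuel
  induction fuel with
  | zero => intro lo size; simp [find_low_index1_searchB]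
  | succ n ih =>
    intro lo size
    rw [find_low_index1_searchB]
    by_cases h0 : size = 0
    · simp [h0]
    · simp only [h0, if_false]
      by_cases hc : key ≤ arr.getD (lo + size / 2) 0
      · simp only [hc, if_true]
        have := ih lo (size / 2)
        omega
      · simp only [hc, if_false]
        have := ih (lo + size / 2 + 1) (size - size / 2 - 1)
        omega

theorem loopA_eq_searchB (arr : List Int) (key : Int) :
    ∀ (size lo fa fb : Nat), size ≤ fa → size < fb →
      find_low_index1_loopA arr key fa lo (lo + size) = find_low_index1_searchB arr key fb lo size := by
  intro size
  induction size using Nat.strong_induction_on with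
  | _ size ih =>
    intro lo fa fb hfa hfb
    obtain ⟨b, rfl⟩ : ∃ b, fb = b + 1 := ⟨fb - 1, by omega⟩
    rw [find_low_index1_searchB]
    by_cases h0 : size = 0
    · subst h0
      cases fa with
      | zero => simp [find_low_index1_loopA]
      | succ a => simp [find_low_index1_loopA]
    · obtain ⟨a, rfl⟩ : ∃ a, fa = a + 1 := ⟨fa - 1, by omega⟩
      have hlt : lo < lo + size := by omega
      have hmi : (lo + (lo + size)) / 2 = lo + size / 2 := by omega
      rw [find_low_index1_loopA]
      simp only [hlt, if_true, hmi, h0, if_false]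
      by_cases hc : arr.getD (lo + size / 2) 0 < key
      · have hnc : ¬ key ≤ arr.getD (lo + size / 2) 0 := by omega
        simp only [hc, if_true, hnc, if_false]
        have hsplit : lo + size = (lo + size / 2 + 1) + (size - size / 2 - 1) := by omega
        rw [hsplit]
        exact ih (size - size / 2 - 1) (by omega) _ a b (by omega) (by omega)
      · have hyc : key ≤ arr.getD (lo + size / 2) 0 := by omega
        simp only [hc, if_false, hyc, if_true]
        exact ih (size / 2) (by omega) lo a b (by omega) (by omega)

-- ===== VERDICT (by name: the statement is the Claim_ definition above) =====
theorem find_low_index1_spec : Claim_equal_find_low_index1 := by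
  intro arr key _
  unfold Spec_find_low_index1 find_low_index1 find_low_index1_alt
  have heq := loopA_eq_searchB arr key arr.length 0 arr.length (arr.length + 1) (by omega) (by omega)
  have hle := searchB_le arr key (arr.length + 1) 0 arr.length
  simp only [Nat.zero_add] at heq hle
  rw [heq]
  dsimp only
  split_ifs with h1 h2 h2 <;> first
  | rfl
  | (exfalso; omega)
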